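-- pv_equiv track=rewrite | github.com/FastLED/FastLED | ci/util/port_utils.py | chip_to_environment
-- ===== SOURCE A (Python) =====
-- CHIP_TO_ENVIRONMENT: dict[str, str] = {
--     "ESP32-S3": "esp32s3",
--     "ESP32-C6": "esp32c6",
--     "ESP32-C3": "esp32c3",
--     "ESP32-C2": "esp32c2",
--     "ESP32-H2": "esp32h2",
--     "ESP32": "esp32dev",  # Generic ESP32 (original)
--     "ESP8266": "esp8266",  # ESP8266
-- }
--
-- def chip_to_environment(chip_type: str) -> str | None:
--     """Map an ESP chip type to a PlatformIO environment name.
--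
--     Handles chip variants like "ESP32-S3 (QFN56)" by matching the base chip type.
--
--     Args:
--         chip_type: Chip type string from esptool (e.g., "ESP32-S3", "ESP32-C6 (QFN40)")
--
--     Returns:
--         PlatformIO environment name (e.g., "esp32s3") or None if no mapping found
--     """
--     # Normalize chip type for comparison
--     chip_upper = chip_type.upper()
--
--     # Try exact match first
--     for known_chip, env in CHIP_TO_ENVIRONMENT.items():
--         if chip_upper == known_chip.upper():
--             return env
--
--     # Try prefix match for variants like "ESP32-S3 (QFN56)"
--     for known_chip, env in CHIP_TO_ENVIRONMENT.items():
--         if chip_upper.startswith(known_chip.upper()):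
--             return env
--
--     return None
-- ===== SOURCE B (Python) =====
-- CHIP_TO_ENVIRONMENT: dict[str, str] = {
--     "ESP32-S3": "esp32s3",
--     "ESP32-C6": "esp32c6",
--     "ESP32-C3": "esp32c3",
--     "ESP32-C2": "esp32c2",
--     "ESP32-H2": "esp32h2",
--     "ESP32": "esp32dev",
--     "ESP8266": "esp8266",
-- }
--
--
-- def chip_to_environment(chip_type: str) -> str | None:
--     """Single pass: exact equality is subsumed by startswith, and no table key
--     is a prefix of an earlier-needed key, so one prefix scan suffices."""
--     chip_upper = chip_type.upper()
--     return next(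
--         (env for known_chip, env in CHIP_TO_ENVIRONMENT.items()
--          if chip_upper.startswith(known_chip.upper())),
--         None,
--     )
-- ===== Notes on version B (the rewrite author's own statement) =====
-- stated objective: simpler
-- what changed: Replaces A's two sequential passes over the table (exact-equality pass, then prefix pass) with a single prefix scan; exact equality is subsumed by startswith and no table key is a prefix of an earlier key, so the first match is unchanged.
import Mathlib
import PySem

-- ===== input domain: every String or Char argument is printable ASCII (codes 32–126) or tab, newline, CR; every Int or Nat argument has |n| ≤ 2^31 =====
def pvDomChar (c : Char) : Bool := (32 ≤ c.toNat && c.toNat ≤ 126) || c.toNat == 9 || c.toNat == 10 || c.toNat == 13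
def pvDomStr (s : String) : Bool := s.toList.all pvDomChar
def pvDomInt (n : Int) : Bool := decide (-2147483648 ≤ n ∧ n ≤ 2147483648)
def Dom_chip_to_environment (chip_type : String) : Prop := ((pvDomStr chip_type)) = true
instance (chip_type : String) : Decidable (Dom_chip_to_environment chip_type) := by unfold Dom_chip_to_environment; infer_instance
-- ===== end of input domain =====

-- B replaces A's two scans (exact match, then prefix match) by ONE prefix scan: simpler, same result.

-- ===== PORT A =====
-- CHIP_TO_ENVIRONMENT as an association list in insertion order (keys are distinct literals)
def pvChipTable : List (String × String) :=
  [("ESP32-S3", "esp32s3"), ("ESP32-C6", "esp32c6"), ("ESP32-C3", "esp32c3"),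
   ("ESP32-C2", "esp32c2"), ("ESP32-H2", "esp32h2"), ("ESP32", "esp32dev"),
   ("ESP8266", "esp8266")]

-- first loop of A: exact match against known_chip.upper()
def pvExactLoop (chip_upper : String) : List (String × String) → Option String
  | [] => none
  | (known_chip, env) :: rest =>
      if chip_upper == PySem.Str.upper known_chip then some env
      else pvExactLoop chip_upper rest

-- second loop of A: prefix match
def pvPrefixLoop (chip_upper : String) : List (String × String) → Option String
  | [] => none
  | (known_chip, env) :: rest =>
      if PySem.Str.startswith chip_upper (PySem.Str.upper known_chip) then some env
      else pvPrefixLoop chip_upper rest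

def chip_to_environment (chip_type : String) : Option String :=
  let chip_upper := PySem.Str.upper chip_type
  match pvExactLoop chip_upper pvChipTable with
  | some env => some env
  | none => pvPrefixLoop chip_upper pvChipTable

-- ===== PORT B =====
-- B's single generator scan: first env whose uppercased key is a prefix of chip_upper
def pvAltScan (chip_upper : String) : List (String × String) → Option String
  | [] => none
  | (known_chip, env) :: rest =>
      if PySem.Str.startswith chip_upper (PySem.Str.upper known_chip) then some env
      else pvAltScan chip_upper rest

def chip_to_environment_alt (chip_type : String) : Option String :=
  pvAltScan (PySem.Str.upper chip_type) pvChipTable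

-- ===== PRECONDITION & SPEC =====
def Spec_chip_to_environment (chip_type : String) (out : Option String) : Prop := out = chip_to_environment_alt chip_type
instance (chip_type : String) (out : Option String) : Decidable (Spec_chip_to_environment chip_type out) := by unfold Spec_chip_to_environment; infer_instance

-- ===== CLAIM (what is proved, stated in full; the proofs are below) =====
def Claim_equal_chip_to_environment : Prop := ∀ (chip_type : String), Dom_chip_to_environment chip_type → Spec_chip_to_environment chip_type (chip_to_environment chip_type)

-- ===== LEMMAS AND PROOFS =====

-- A's second loop is B's scan (same code over the same table)
theorem pvPrefix_eq_alt (u : String) (l : List (String × String)) :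
    pvPrefixLoop u l = pvAltScan u l := by
  induction l with
  | nil => rfl
  | cons p rest ih => cases p with
    | mk k e => simp only [pvPrefixLoop, pvAltScan, ih]

-- if A's exact pass hits, B's prefix scan returns the same env
theorem pvExact_imp_alt (u : String) (e : String)
    (h : pvExactLoop u pvChipTable = some e) :
    pvAltScan u pvChipTable = some e := by
  simp only [pvChipTable, pvExactLoop] at h
  split_ifs at h with h1 h2 h3 h4 h5 h6 h7 <;>
    first
    | (injection h with h; subst h;
       first
       | (rw [beq_iff_eq] at h1; subst h1; decide)
       | (rw [beq_iff_eq] at h2; subst h2; decide)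
       | (rw [beq_iff_eq] at h3; subst h3; decide)
       | (rw [beq_iff_eq] at h4; subst h4; decide)
       | (rw [beq_iff_eq] at h5; subst h5; decide)
       | (rw [beq_iff_eq] at h6; subst h6; decide)
       | (rw [beq_iff_eq] at h7; subst h7; decide))

-- ===== VERDICT (by name: the statement is the Claim_ definition above) =====
theorem chip_to_environment_spec : Claim_equal_chip_to_environment := by
  intro chip_type _
  unfold Spec_chip_to_environment chip_to_environment chip_to_environment_alt
  cases he : pvExactLoop (PySem.Str.upper chip_type) pvChipTable with
  | none => simp only [he, pvPrefix_eq_alt]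
  | some e => simp only [he, pvExact_imp_alt _ _ he]
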